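-- pv_equiv track=rewrite | github.com/maheshwaranandh/365-days-of-code | day84-1704.py | halvesAreAlike
-- ===== SOURCE A (Python) =====
-- def halvesAreAlike(s: str) -> bool:
--     vow="AEIOUaeiou"
--     a=0
--     b=0
--     for i in range(len(s)):
--         if i>=len(s)//2:
--             if s[i] in vow:
--                 b+=1
--         else:
--             if s[i] in vow:
--                 a+=1
--     return True if a==b else False
-- ===== SOURCE B (Python) =====
-- def halvesAreAlike(s: str) -> bool:
--     vow = "AEIOUaeiou"
--     half = len(s) // 2
--     first, second = s[:half], s[half:]
--     a = sum(first.count(v) for v in vow)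
--     b = sum(second.count(v) for v in vow)
--     return a == b
-- ===== Notes on version B (the rewrite author's own statement) =====
-- stated objective: simpler
-- what changed: A's single index loop over range(len(s)) that tests i against len(s)//2 and dispatches each character into one of two counters is replaced by slicing the string into its two halves and comparing the per-half sums of the ten vowels' .count(v); same O(n) asymptotics, but the character scanning moves from a per-index Python loop into C-level str.count calls.
import Mathlib
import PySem

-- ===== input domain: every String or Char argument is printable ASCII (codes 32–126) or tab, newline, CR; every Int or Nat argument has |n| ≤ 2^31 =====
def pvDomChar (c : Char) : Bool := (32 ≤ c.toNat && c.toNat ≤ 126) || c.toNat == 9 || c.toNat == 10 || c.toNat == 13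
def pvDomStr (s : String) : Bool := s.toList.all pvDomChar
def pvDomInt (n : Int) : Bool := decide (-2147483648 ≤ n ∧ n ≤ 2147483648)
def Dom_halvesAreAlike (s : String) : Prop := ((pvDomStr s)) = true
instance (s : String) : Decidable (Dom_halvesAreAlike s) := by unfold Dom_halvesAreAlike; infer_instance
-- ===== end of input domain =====

-- B replaces A's single index-driven loop (dispatching each position to one of two
-- counters) by slicing the string into its two halves and summing, per vowel, the
-- substring-count of that vowel in each half; objective: simpler decomposition.

-- ===== PORT A =====
def halvesAreAlike (s : String) : Bool :=
  let vow := "AEIOUaeiou"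
  let ab := (PySem.List.pyRange 0 (PySem.Str.len s) 1).foldl
    (fun (ab : Int × Int) i =>
      if PySem.Int.floordiv (PySem.Str.len s) 2 ≤ i then
        if PySem.Chars.isIn [PySem.List.pyGetD s.toList i ' '] vow.toList then (ab.1, ab.2 + 1) else ab
      else
        if PySem.Chars.isIn [PySem.List.pyGetD s.toList i ' '] vow.toList then (ab.1 + 1, ab.2) else ab)
    ((0 : Int), (0 : Int))
  if ab.1 = ab.2 then true else false

-- ===== PORT B =====
def halvesAreAlike_alt (s : String) : Bool :=
  let vow := "AEIOUaeiou"
  let half : Int := PySem.Int.floordiv (PySem.Str.len s) 2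
  let first := PySem.Str.slice s none (some half)
  let second := PySem.Str.slice s (some half) none
  let a := (vow.toList.map (fun v => (PySem.Str.count first (String.ofList [v]) : Int))).sum
  let b := (vow.toList.map (fun v => (PySem.Str.count second (String.ofList [v]) : Int))).sum
  a == b

-- ===== PRECONDITION & SPEC =====
def Spec_halvesAreAlike (s : String) (out : Bool) : Prop := out = halvesAreAlike_alt s
instance (s : String) (out : Bool) : Decidable (Spec_halvesAreAlike s out) := by unfold Spec_halvesAreAlike; infer_instance

-- ===== CLAIM (what is proved, stated in full; the proofs are below) =====
def Claim_equal_halvesAreAlike : Prop := ∀ (s : String), Dom_halvesAreAlike s → Spec_halvesAreAlike s (halvesAreAlike s)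

-- ===== LEMMAS AND PROOFS =====

-- vowel test used by the proofs only
def pvIsVow (c : Char) : Bool := "AEIOUaeiou".toList.contains c

-- membership of a one-character string is membership of the character
lemma pv_isIn_singleton (c : Char) (vs : List Char) :
    PySem.Chars.isIn [c] vs = vs.contains c := by
  simp only [List.contains_eq_mem]
  by_cases h : c ∈ vs
  · simp [PySem.Chars.isIn_iff_infix, h, List.singleton_infix_iff]
  · simp [PySem.Chars.isIn_eq_false_iff, h, List.singleton_infix_iff]

-- Python's s.count(v) for a one-character v is List.count
lemma pv_count_go_singleton (v : Char) :
    ∀ (l : List Char) (acc : Nat), PySem.Chars.count.go [v] l.length l acc = acc + l.count v := by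
  intro l
  induction l with
  | nil => intro acc; simp [PySem.Chars.count.go]
  | cons c t ih =>
    intro acc
    show PySem.Chars.count.go [v] (t.length + 1) (c :: t) acc = _
    rw [PySem.Chars.count.go]
    by_cases h : v = c
    · subst h
      have hp : [v].isPrefixOf (v :: t) = true := by simp [List.isPrefixOf]
      rw [hp]
      simp only [if_true, List.length_singleton, List.drop_succ_cons, List.drop_zero]
      rw [ih]
      simp
      omega
    · have hp : ([v].isPrefixOf (c :: t)) = false := by
        simp [List.isPrefixOf]
        exact fun e => h e
      rw [hp]
      simp only [if_false, Bool.false_eq_true]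
      rw [ih]
      simp [Ne.symm h]

lemma pv_count_singleton (l : List Char) (v : Char) :
    PySem.Chars.count l [v] = l.count v := by
  simpa using pv_count_go_singleton v l 0

-- the indicator sum over a duplicate-free list is a membership test
lemma pv_indicator_sum (vs : List Char) (hnd : vs.Nodup) (c : Char) :
    (vs.map (fun v => if v == c then (1 : Int) else 0)).sum
      = if vs.contains c then (1 : Int) else 0 := by
  induction vs with
  | nil => simp
  | cons w ws ihw =>
    obtain ⟨hw, hnd'⟩ := List.nodup_cons.mp hnd
    by_cases hwc : w = c
    · subst hwc
      have hz : (ws.map (fun v => if v = w then (1 : Int) else 0)).sum = 0 := by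
        rw [List.sum_eq_zero]
        intro x hx
        obtain ⟨v, hv, rfl⟩ := List.mem_map.mp hx
        simp only [ite_eq_right_iff]
        intro hvw; exact absurd (hvw ▸ hv) hw
      simp [hz]
    · rw [List.map_cons, List.sum_cons, ihw hnd']
      simp [hwc, Ne.symm hwc]

lemma pv_sum_counts (vs : List Char) (hnd : vs.Nodup) (l : List Char) :
    (vs.map (fun v => (l.count v : Int))).sum = (l.countP (fun c => vs.contains c) : Int) := by
  induction l with
  | nil => simp
  | cons c t ih =>
    calc (vs.map (fun v => ((c :: t).count v : Int))).sum
        = (vs.map (fun v => (t.count v : Int) + if v == c then (1 : Int) else 0)).sum := by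
          apply congrArg
          apply List.map_congr_left
          intro v _
          by_cases hvc : v = c
          · subst hvc; simp
          · simp [hvc, Ne.symm hvc]
      _ = (vs.map (fun v => (t.count v : Int))).sum
            + (vs.map (fun v => if v == c then (1 : Int) else 0)).sum := by
          rw [← List.sum_map_add]
      _ = (t.countP (fun c => vs.contains c) : Int) + if vs.contains c then (1 : Int) else 0 := by
          rw [ih, pv_indicator_sum vs hnd c]
      _ = ((c :: t).countP (fun c => vs.contains c) : Int) := by
          rw [List.countP_cons]
          split_ifs with h <;> simp

-- A's loop body on the first half adds to the first counter only
lemma pv_foldl_first (l : List Char) (ab : Int × Int) :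
    l.foldl (fun ab c => if pvIsVow c then (ab.1 + 1, ab.2) else ab) ab
      = (ab.1 + (l.countP pvIsVow : Int), ab.2) := by
  induction l generalizing ab with
  | nil => simp
  | cons c t ih =>
    simp only [List.foldl_cons, List.countP_cons]
    by_cases h : pvIsVow c
    · simp [h, ih]; omega
    · simp [h, ih]

-- A's loop body on the second half adds to the second counter only
lemma pv_foldl_second (l : List Char) (ab : Int × Int) :
    l.foldl (fun ab c => if pvIsVow c then (ab.1, ab.2 + 1) else ab) ab
      = (ab.1, ab.2 + (l.countP pvIsVow : Int)) := by
  induction l generalizing ab with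
  | nil => simp
  | cons c t ih =>
    simp only [List.foldl_cons, List.countP_cons]
    by_cases h : pvIsVow c
    · simp [h, ih]; omega
    · simp [h, ih]

lemma pv_if_eq_beq (a b : Int) : (if a = b then true else false) = (a == b) := by
  by_cases h : a = b <;> simp [h]

-- ===== VERDICT (by name: the statement is the Claim_ definition above) =====
theorem halvesAreAlike_spec : Claim_equal_halvesAreAlike := by
  intro s _
  unfold Spec_halvesAreAlike halvesAreAlike halvesAreAlike_alt
  simp only [PySem.Str.len_eq]
  have hfd : PySem.Int.floordiv ((s.toList.length : Nat) : Int) 2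
      = ((s.toList.length / 2 : Nat) : Int) := by
    exact_mod_cast PySem.Int.floordiv_natCast s.toList.length 2
  simp only [hfd]
  set cs := s.toList with hcs
  have hhalf_le : cs.length / 2 ≤ cs.length := Nat.div_le_self cs.length 2
  have hlen_take : (cs.take (cs.length/2)).length = cs.length/2 := by
    rw [List.length_take]; omega
  -- B: the two slices are take/drop, its per-vowel counts sum to countP
  simp only [PySem.Str.count_eq, PySem.Str.toList_slice, PySem.Chars.slice_eq_listSlice,
    String.toList_ofList, ← hcs]
  rw [PySem.List.slice_to_natCast, PySem.List.slice_from_natCast]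
  simp only [pv_count_singleton]
  have hnd : ("AEIOUaeiou".toList).Nodup := by decide
  rw [pv_sum_counts _ hnd (cs.take (cs.length/2)), pv_sum_counts _ hnd (cs.drop (cs.length/2))]
  -- A's loop: split the index range at the midpoint
  rw [PySem.List.pyRange_one_append 0 ((cs.length/2 : Nat) : Int) ((cs.length : Nat) : Int)
      (by positivity) (by exact_mod_cast hhalf_le), List.foldl_append]
  -- second segment: the condition holds, only the `b` counter moves, over cs.drop (len/2)
  rw [PySem.List.foldl_congr_mem
      (PySem.List.pyRange ((cs.length/2 : Nat) : Int) ((cs.length : Nat) : Int)) _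
      (fun (ab : Int × Int) i =>
        if pvIsVow (PySem.List.pyGetD cs i ' ') then (ab.1, ab.2 + 1) else ab) _ ?_]
  · rw [PySem.List.foldl_pyRange_pyGetD' cs ' '
        (fun (ab : Int × Int) c => if pvIsVow c then (ab.1, ab.2 + 1) else ab) _ (by positivity),
      pv_foldl_second]
    simp only [Int.toNat_natCast]
    -- first segment: the condition fails, only the `a` counter moves, over cs.take (len/2)
    rw [PySem.List.foldl_congr_mem (PySem.List.pyRange 0 ((cs.length/2 : Nat) : Int)) _
        (fun (ab : Int × Int) i =>
          if pvIsVow (PySem.List.pyGetD (cs.take (cs.length/2)) i ' ') then (ab.1 + 1, ab.2) else ab)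
        ((0 : Int), (0 : Int)) ?_]
    · simp only [show ((cs.length/2 : Nat) : Int) = (((cs.take (cs.length/2)).length : Nat) : Int) by
          rw [hlen_take]]
      rw [PySem.List.foldl_pyRange_zero_pyGetD' (cs.take (cs.length/2)) ' '
          (fun (ab : Int × Int) c => if pvIsVow c then (ab.1 + 1, ab.2) else ab)
          ((0 : Int), (0 : Int)),
        pv_foldl_first]
      rw [show pvIsVow = (fun c => "AEIOUaeiou".toList.contains c) from rfl]
      simp only [zero_add]
      exact pv_if_eq_beq _ _
    · intro ab i hi
      rw [PySem.List.mem_pyRange_one] at hi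
      have hineg : ¬ ((cs.length/2 : Nat) : Int) ≤ i := by omega
      rw [if_neg hineg]
      have hget : PySem.List.pyGetD cs i ' ' = PySem.List.pyGetD (cs.take (cs.length/2)) i ' ' := by
        rw [PySem.List.pyGetD_eq_getElem cs ' ' hi.1
              (by calc i < ((cs.length/2 : Nat) : Int) := hi.2
                    _ ≤ _ := by exact_mod_cast hhalf_le),
            PySem.List.pyGetD_eq_getElem (cs.take (cs.length/2)) ' ' hi.1
              (by rw [hlen_take]; exact hi.2),
            List.getElem_take]
      rw [hget, pv_isIn_singleton]
      rfl
  · intro ab i hi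
    rw [PySem.List.mem_pyRange_one] at hi
    rw [if_pos hi.1, pv_isIn_singleton]
    rfl
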